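-- pv_equiv track=rewrite | github.com/Vishalm999/Wave_Sales | reminder/reminder.py | _find_single_month
-- ===== SOURCE A (Python) =====
-- MONTH_MAP = {
--     "january": 1, "february": 2, "march": 3, "april": 4, "may": 5, "june": 6,
--     "july": 7, "august": 8, "september": 9, "october": 10, "november": 11, "december": 12
-- }
--
-- def _tokenize_query(text: str) -> list:
--     """Split text into lowercase tokens, preserving punctuation-stripped words."""
--     tokens = []
--     for tok in text.lower().replace('–', ' ').replace('—', ' ').split():
--         tokens.append(tok.strip('.,;:!?()"\''))
--     return tokens
--
-- def _find_year_in_token(token: str):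
--     """Return int year if token is a 4-digit year starting with 20, else None."""
--     c = token.strip('.,;:!?()"\'')
--     if len(c) == 4 and c.isdigit() and c.startswith('20'):
--         return int(c)
--     return None
--
-- def _find_single_month(query_lower: str):
--     """
--     Find a single month (with optional year) in patterns like 'for april', 'in april', 'april YYYY'.
--     Returns (month_name, year_str_or_None) or None.
--     Does not trigger if there's a range.
--     """
--     tokens = _tokenize_query(query_lower)
--     # Look for 'for/in MONTH [YEAR]' pattern
--     for i, tok in enumerate(tokens):
--         if tok in ('for', 'in') and i + 1 < len(tokens):
--             if tokens[i+1] in MONTH_MAP: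
--                 month_name = tokens[i+1]
--                 year_str = None
--                 if i + 2 < len(tokens):
--                     y = _find_year_in_token(tokens[i+2])
--                     if y:
--                         year_str = str(y)
--                     elif tokens[i+2] == 'of' and i + 3 < len(tokens):
--                         y = _find_year_in_token(tokens[i+3])
--                         if y:
--                             year_str = str(y)
--                 return month_name, year_str
--     # Bare month at end
--     for i in range(len(tokens) - 1, -1, -1):
--         tok = tokens[i]
--         if tok in MONTH_MAP:
--             year_str = None
--             if i + 1 < len(tokens):
--                 y = _find_year_in_token(tokens[i+1])
--                 if y:
--                     year_str = str(y)
--             return tok, year_str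
--     return None
-- ===== SOURCE B (Python) =====
-- MONTH_MAP = {
--     "january": 1, "february": 2, "march": 3, "april": 4, "may": 5, "june": 6,
--     "july": 7, "august": 8, "september": 9, "october": 10, "november": 11, "december": 12
-- }
--
-- def _tokenize_query(text: str) -> list:
--     tokens = []
--     for tok in text.lower().replace('\u2013', ' ').replace('\u2014', ' ').split():
--         tokens.append(tok.strip('.,;:!?()"\''))
--     return tokens
--
-- def _find_year_in_token(token: str):
--     c = token.strip('.,;:!?()"\'')
--     if len(c) == 4 and c.isdigit() and c.startswith('20'):
--         return int(c)
--     return None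
--
-- def _find_single_month(query_lower: str):
--     """Single fused forward pass: return the first 'for/in MONTH' match immediately,
--     while remembering the last bare-month index for the fallback."""
--     tokens = _tokenize_query(query_lower)
--     last_bare = None
--     for i, tok in enumerate(tokens):
--         if tok in ('for', 'in') and i + 1 < len(tokens) and tokens[i+1] in MONTH_MAP:
--             year_str = None
--             if i + 2 < len(tokens):
--                 y = _find_year_in_token(tokens[i+2])
--                 if y:
--                     year_str = str(y)
--                 elif tokens[i+2] == 'of' and i + 3 < len(tokens):
--                     y = _find_year_in_token(tokens[i+3])
--                     if y:
--                         year_str = str(y)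
--             return tokens[i+1], year_str
--         if tok in MONTH_MAP:
--             last_bare = i
--     if last_bare is None:
--         return None
--     year_str = None
--     if last_bare + 1 < len(tokens):
--         y = _find_year_in_token(tokens[last_bare + 1])
--         if y:
--             year_str = str(y)
--     return tokens[last_bare], year_str
-- ===== Notes on version B (the rewrite author's own statement) =====
-- stated objective: alternative
-- what changed: Replaces A's two sequential passes (a forward scan for 'for/in MONTH', then a separate backward scan for the last bare month) with one fused forward pass that returns a prefixed match immediately and tracks the last bare-month index for the fallback.
import Mathlib
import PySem

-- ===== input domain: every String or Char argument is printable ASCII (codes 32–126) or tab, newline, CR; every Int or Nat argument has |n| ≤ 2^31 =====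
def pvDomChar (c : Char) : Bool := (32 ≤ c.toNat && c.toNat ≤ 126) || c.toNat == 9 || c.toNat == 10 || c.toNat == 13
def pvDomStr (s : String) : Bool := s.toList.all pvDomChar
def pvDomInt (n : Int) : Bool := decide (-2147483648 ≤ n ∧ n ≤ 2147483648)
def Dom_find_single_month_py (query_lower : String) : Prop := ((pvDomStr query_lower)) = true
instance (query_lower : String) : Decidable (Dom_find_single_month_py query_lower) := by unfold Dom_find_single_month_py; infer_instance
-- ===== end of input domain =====

-- B fuses A's two sequential passes (forward scan for 'for/in MONTH', then backward scan for
-- the last bare month) into one forward pass tracking the last bare-month index; same result.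

-- ===== PORT A =====
-- shared module helpers (identical in Source A and Source B): MONTH_MAP, _tokenize_query, _find_year_in_token
def pvMonthMap : PySem.Dict String Int := PySem.Dict.ofList
  [("january", 1), ("february", 2), ("march", 3), ("april", 4), ("may", 5), ("june", 6),
   ("july", 7), ("august", 8), ("september", 9), ("october", 10), ("november", 11), ("december", 12)]

def pvIsMonth (tok : String) : Bool := PySem.Dict.contains pvMonthMap tok

def pvTokenize (text : String) : List String :=
  (PySem.Str.split₀ (PySem.Str.replace (PySem.Str.replace (PySem.Str.lower text) "–" " ") "—" " ")).foldl
    (fun acc tok => acc ++ [PySem.Str.stripChars tok ".,;:!?()\"'"]) []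

def pvFindYear (token : String) : Option Int :=
  let c := PySem.Str.stripChars token ".,;:!?()\"'"
  if PySem.Str.len c == 4 && PySem.Str.strIsdigit c && PySem.Str.startswith c "20" then
    PySem.Int.ofStr? c
  else none

-- 'if y:' — y is truthy iff it is a non-None, nonzero int
def pvTruthy : Option Int → Bool
  | some v => v != 0
  | none => false

-- the prefixed-branch year rule at position i ('for/in MONTH' found at i, i+1): tokens[i+2], with 'of YYYY' continuation
def pvPrefYearStr (tokens : List String) (i : Nat) : Option String :=
  if i + 2 < tokens.length then
    let y := pvFindYear (tokens.getD (i+2) "")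
    if pvTruthy y then some (PySem.Int.toStr (y.getD 0))
    else if tokens.getD (i+2) "" == "of" && decide (i + 3 < tokens.length) then
      let y2 := pvFindYear (tokens.getD (i+3) "")
      if pvTruthy y2 then some (PySem.Int.toStr (y2.getD 0)) else none
    else none
  else none

-- the bare-month year rule at position i: tokens[i+1] only
def pvBareYearStr (tokens : List String) (i : Nat) : Option String :=
  if i + 1 < tokens.length then
    let y := pvFindYear (tokens.getD (i+1) "")
    if pvTruthy y then some (PySem.Int.toStr (y.getD 0)) else none
  else none

-- A's first loop: for i, tok in enumerate(tokens) — return on first 'for/in MONTH'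
def pvLoopA (tokens : List String) (i : Nat) : Option (String × Option String) :=
  if h : i < tokens.length then
    let tok := tokens.getD i ""
    if (tok == "for" || tok == "in") && decide (i + 1 < tokens.length)
        && pvIsMonth (tokens.getD (i+1) "") then
      some (tokens.getD (i+1) "", pvPrefYearStr tokens i)
    else pvLoopA tokens (i+1)
  else none
  termination_by tokens.length - i

-- A's second loop: for i in range(len(tokens)-1, -1, -1) — return on first (= last) bare month
def pvLoopBwd (tokens : List String) (i : Nat) : Option (String × Option String) :=
  if pvIsMonth (tokens.getD i "") then some (tokens.getD i "", pvBareYearStr tokens i)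
  else
    match i with
    | 0 => none
    | j + 1 => pvLoopBwd tokens j

def find_single_month_py (query_lower : String) : Option (String × Option String) :=
  let tokens := pvTokenize query_lower
  match pvLoopA tokens 0 with
  | some r => some r
  | none => if tokens.length = 0 then none else pvLoopBwd tokens (tokens.length - 1)

-- ===== PORT B =====
-- B's single fused pass: return a prefixed match immediately, remember the last bare-month index
def pvLoopB (tokens : List String) (i : Nat) (last : Option Nat) :
    Option (String × Option String) :=
  if h : i < tokens.length then
    let tok := tokens.getD i ""
    if (tok == "for" || tok == "in") && decide (i + 1 < tokens.length)
        && pvIsMonth (tokens.getD (i+1) "") then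
      some (tokens.getD (i+1) "", pvPrefYearStr tokens i)
    else pvLoopB tokens (i+1) (if pvIsMonth tok then some i else last)
  else
    match last with
    | some j => some (tokens.getD j "", pvBareYearStr tokens j)
    | none => none
  termination_by tokens.length - i

def find_single_month_py_alt (query_lower : String) : Option (String × Option String) :=
  pvLoopB (pvTokenize query_lower) 0 none

-- ===== PRECONDITION & SPEC =====
def Spec_find_single_month_py (query_lower : String) (out : Option (String × Option String)) : Prop := out = find_single_month_py_alt query_lower
instance (query_lower : String) (out : Option (String × Option String)) : Decidable (Spec_find_single_month_py query_lower out) := by unfold Spec_find_single_month_py; infer_instance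

-- ===== CLAIM (what is proved, stated in full; the proofs are below) =====
def Claim_equal_find_single_month_py : Prop := ∀ (query_lower : String), Dom_find_single_month_py query_lower → Spec_find_single_month_py query_lower (find_single_month_py query_lower)

-- ===== LEMMAS AND PROOFS =====

-- proof-only helpers
def pvFinish (tokens : List String) : Option Nat → Option (String × Option String)
  | some j => some (tokens.getD j "", pvBareYearStr tokens j)
  | none => none

def pvStep (tokens : List String) (acc : Option Nat) (k : Nat) : Option Nat :=
  if pvIsMonth (tokens.getD k "") then some k else acc

-- B's loop = A's first loop, falling back to the last bare-month index accumulated over [i, len)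
theorem pvLoopB_eq (tokens : List String) (i : Nat) (last : Option Nat) :
    pvLoopB tokens i last =
      (match pvLoopA tokens i with
       | some r => some r
       | none => pvFinish tokens ((List.range' i (tokens.length - i)).foldl (pvStep tokens) last)) := by
  by_cases h : i < tokens.length
  · have hr : tokens.length - i = (tokens.length - (i+1)) + 1 := by omega
    rw [pvLoopB.eq_def, pvLoopA.eq_def]
    simp only [dif_pos h]
    by_cases hc : ((tokens.getD i "" == "for" || tokens.getD i "" == "in")
        && decide (i + 1 < tokens.length) && pvIsMonth (tokens.getD (i+1) "")) = true
    · rw [if_pos hc, if_pos hc]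
    · rw [if_neg hc, if_neg hc,
        pvLoopB_eq tokens (i+1), hr, List.range'_succ, List.foldl_cons]
      rfl
  · rw [pvLoopB.eq_def, pvLoopA.eq_def]
    have hz : tokens.length - i = 0 := by omega
    simp only [h, dif_neg, not_false_iff, hz, List.range'_zero, List.foldl_nil]
    cases last <;> simp [pvFinish]
  termination_by tokens.length - i

-- A's backward loop = pvFinish of the foldl accumulation over [0, j]
theorem pvLoopBwd_eq (tokens : List String) (j : Nat) :
    pvLoopBwd tokens j = pvFinish tokens ((List.range' 0 (j+1)).foldl (pvStep tokens) none) := by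
  induction j with
  | zero =>
      rw [pvLoopBwd.eq_def]
      by_cases hm : pvIsMonth ((tokens[0]?).getD "") = true <;>
        simp [hm, pvStep, pvFinish, List.getD]
  | succ k ih =>
      rw [pvLoopBwd.eq_def]
      have hsplit : List.range' 0 (k+1+1) = List.range' 0 (k+1) ++ [k+1] := by
        simpa using List.range'_concat (s := 0) (n := k + 1) (step := 1)
      rw [hsplit, List.foldl_append]
      by_cases hm : pvIsMonth ((tokens[k+1]?).getD "") = true <;>
        simp [hm, pvStep, pvFinish, ih, List.getD]

theorem find_single_month_py_core (tokens : List String) :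
    (match pvLoopA tokens 0 with
     | some r => some r
     | none => if tokens.length = 0 then none else pvLoopBwd tokens (tokens.length - 1)) =
    pvLoopB tokens 0 none := by
  rw [pvLoopB_eq]
  cases hA : pvLoopA tokens 0 with
  | some r => simp
  | none =>
      simp only []
      by_cases hz : tokens.length = 0
      · simp [hz, pvFinish]
      · have h1 : tokens.length - 1 + 1 = tokens.length := by omega
        rw [if_neg hz, pvLoopBwd_eq, h1]
        simp

-- ===== VERDICT (by name: the statement is the Claim_ definition above) =====
theorem find_single_month_py_spec : Claim_equal_find_single_month_py := by
  intro q _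
  unfold Spec_find_single_month_py find_single_month_py find_single_month_py_alt
  exact find_single_month_py_core (pvTokenize q)
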